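-- pv_equiv track=rewrite | github.com/whklwhkl/torch-MRF | src/mrf.py | graph_backward
-- ===== SOURCE A (Python) =====
-- def graph_backward(H, W):
--     for i in range(H - 1, -1, -1):
--         if i % 2:
--             for j in range(W):
--                 if j:
--                     yield i, j, j - 1
--                 else:
--                     yield i, j, None
--         else:
--             for j in range(W - 1, -1, -1):
--                 if j == W - 1:
--                     yield i, j, None
--                 else:
--                     yield i, j, j + 1
-- ===== SOURCE B (Python) =====
-- def graph_backward(H, W):
--     # Flat closed-form enumeration: one loop over cell indices 0..H*W-1,
--     # recovering row, column and predecessor by divmod arithmetic.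
--     if W <= 0:
--         return
--     for k in range(H * W):
--         q, r = divmod(k, W)
--         i = H - 1 - q
--         s = 1 if i % 2 else -1
--         j = (0 if s == 1 else W - 1) + s * r
--         yield i, j, (None if r == 0 else j - s)
-- ===== Notes on version B (the rewrite author's own statement) =====
-- stated objective: alternative
-- what changed: Replaces the nested row/column loops with boundary tests by a single flat loop over cell indices 0..H*W-1 that recovers row, direction, column and predecessor by divmod arithmetic (q,r = divmod(k,W); i = H-1-q; j = start + s*r; pred = None iff r==0 else j-s).
import Mathlib
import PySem

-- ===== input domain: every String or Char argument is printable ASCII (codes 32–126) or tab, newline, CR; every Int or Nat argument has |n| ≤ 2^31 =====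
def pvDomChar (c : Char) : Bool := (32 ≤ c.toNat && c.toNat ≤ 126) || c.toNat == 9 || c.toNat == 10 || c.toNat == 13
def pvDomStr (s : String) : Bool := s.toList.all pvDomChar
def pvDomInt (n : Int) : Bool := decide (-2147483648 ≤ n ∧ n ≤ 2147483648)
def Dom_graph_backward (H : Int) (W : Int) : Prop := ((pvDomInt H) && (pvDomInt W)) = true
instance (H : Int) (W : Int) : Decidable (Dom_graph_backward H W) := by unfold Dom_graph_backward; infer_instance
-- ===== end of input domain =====

-- B replaces A's nested row/column loops with boundary tests by a single flat loop over
-- cell indices 0..H*W-1 recovering row, column and predecessor by divmod arithmetic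
-- (objective: alternative). The Python is a generator; both ports return the list of yields.

-- ===== PORT A =====
def graph_backward (H : Int) (W : Int) : List (Int × Int × Option Int) :=
  -- generator: the triples yielded for each i, in order, concatenated
  (PySem.List.pyRange (H - 1) (-1) (-1)).flatMap (fun i =>
    if PySem.Int.mod i 2 ≠ 0 then
      (PySem.List.pyRange 0 W 1).map (fun j =>
        if j ≠ 0 then (i, j, some (j - 1)) else (i, j, none))
    else
      (PySem.List.pyRange (W - 1) (-1) (-1)).map (fun j =>
        if j = W - 1 then (i, j, none) else (i, j, some (j + 1))))

-- ===== PORT B =====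
def graph_backward_alt (H : Int) (W : Int) : List (Int × Int × Option Int) :=
  -- Source B: if W <= 0: return; for k in range(H*W): q,r = divmod(k,W); …; yield i, j, pred
  if W ≤ 0 then [] else
  (PySem.List.pyRange 0 (H * W) 1).map (fun k =>
    let q := PySem.Int.floordiv k W
    let r := PySem.Int.mod k W
    let i := H - 1 - q
    let s : Int := if PySem.Int.mod i 2 ≠ 0 then 1 else -1
    let j := (if s = 1 then 0 else W - 1) + s * r
    (i, j, if r = 0 then none else some (j - s)))

-- ===== PRECONDITION & SPEC =====
def Spec_graph_backward (H : Int) (W : Int) (out : List (Int × Int × Option Int)) : Prop := out = graph_backward_alt H W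
instance (H : Int) (W : Int) (out : List (Int × Int × Option Int)) : Decidable (Spec_graph_backward H W out) := by unfold Spec_graph_backward; infer_instance

-- ===== CLAIM (what is proved, stated in full; the proofs are below) =====
def Claim_equal_graph_backward : Prop := ∀ (H : Int) (W : Int), Dom_graph_backward H W → Spec_graph_backward H W (graph_backward H W)

-- ===== LEMMAS AND PROOFS =====

-- A's row for a given i, as it appears in the port.
def rowA (W i : Int) : List (Int × Int × Option Int) :=
  if PySem.Int.mod i 2 ≠ 0 then
    (PySem.List.pyRange 0 W 1).map (fun j =>
      if j ≠ 0 then (i, j, some (j - 1)) else (i, j, none))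
  else
    (PySem.List.pyRange (W - 1) (-1) (-1)).map (fun j =>
      if j = W - 1 then (i, j, none) else (i, j, some (j + 1)))

-- B's per-cell function, as it appears in the port.
def cellB (H W k : Int) : Int × Int × Option Int :=
  let q := PySem.Int.floordiv k W
  let r := PySem.Int.mod k W
  let i := H - 1 - q
  let s : Int := if PySem.Int.mod i 2 ≠ 0 then 1 else -1
  let j := (if s = 1 then 0 else W - 1) + s * r
  (i, j, if r = 0 then none else some (j - s))

theorem floordiv_block (q r W : Int) (hW : 0 < W) (hr0 : 0 ≤ r) (hr : r < W) :
    PySem.Int.floordiv (q * W + r) W = q := by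
  rw [PySem.Int.floordiv_eq_iff_of_pos hW]
  constructor <;> nlinarith

theorem mod_block (q r W : Int) (hW : 0 < W) (hr0 : 0 ≤ r) (hr : r < W) :
    PySem.Int.mod (q * W + r) W = r := by
  have h := PySem.Int.floordiv_mul_add_mod (q * W + r) W
  rw [floordiv_block q r W hW hr0 hr] at h
  omega

-- B's cell at flat index q*W+r, odd row.
theorem cellB_odd (H W : Int) (q r : Nat) (hW : 0 < W) (hr : r < W.toNat)
    (hodd : PySem.Int.mod (H - 1 - (q : Int)) 2 ≠ 0) :
    cellB H W ((q : Int) * W + (r : Int)) =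
      (H - 1 - (q : Int), (r : Int), if (r : Int) = 0 then none else some ((r : Int) - 1)) := by
  have hr0 : (0 : Int) ≤ r := by positivity
  have hrW : (r : Int) < W := by omega
  simp only [cellB, floordiv_block _ _ _ hW hr0 hrW, mod_block _ _ _ hW hr0 hrW,
    if_pos hodd]
  simp

-- B's cell at flat index q*W+r, even row.
theorem cellB_even (H W : Int) (q r : Nat) (hW : 0 < W) (hr : r < W.toNat)
    (heven : ¬ PySem.Int.mod (H - 1 - (q : Int)) 2 ≠ 0) :
    cellB H W ((q : Int) * W + (r : Int)) =
      (H - 1 - (q : Int), W - 1 - (r : Int),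
        if (r : Int) = 0 then none else some (W - (r : Int))) := by
  have hr0 : (0 : Int) ≤ r := by positivity
  have hrW : (r : Int) < W := by omega
  simp only [cellB, floordiv_block _ _ _ hW hr0 hrW, mod_block _ _ _ hW hr0 hrW,
    if_neg heven]
  have hs : ¬ ((-1 : Int) = 1) := by decide
  simp only [if_neg hs]
  have e1 : W - 1 + -1 * (r : Int) = W - 1 - (r : Int) := by ring
  have e2 : W - 1 - (r : Int) - -1 = W - (r : Int) := by ring
  rw [e1, e2]

-- A's row i = H-1-q equals the q-th block of B's flat enumeration.
theorem row_eq_block (H W : Int) (hW : 0 < W) (q : Nat) :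
    rowA W (H - 1 - (q : Int)) =
      (List.range W.toNat).map (fun (r : Nat) => cellB H W ((q : Int) * W + (r : Int))) := by
  unfold rowA
  by_cases hodd : PySem.Int.mod (H - 1 - (q : Int)) 2 ≠ 0
  · rw [if_pos hodd, PySem.List.pyRange_one]
    simp only [Int.sub_zero, List.map_map]
    apply List.map_congr_left
    intro r hr
    rw [List.mem_range] at hr
    rw [cellB_odd H W q r hW hr hodd]
    simp only [Function.comp, Int.zero_add]
    by_cases hr0 : r = 0 <;> simp [hr0]
  · rw [if_neg hodd, PySem.List.pyRange_neg_one]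
    have hlen : (W - 1 - (-1)).toNat = W.toNat := by omega
    rw [hlen, List.map_map]
    apply List.map_congr_left
    intro r hr
    rw [List.mem_range] at hr
    rw [cellB_even H W q r hW hr hodd]
    simp only [Function.comp]
    by_cases hr0 : (r : Int) = 0
    · simp [hr0]
    · have hne : W - 1 - (r : Int) ≠ W - 1 := by omega
      rw [if_neg hne, if_neg hr0]
      have e : W - 1 - (r : Int) + 1 = W - (r : Int) := by ring
      rw [e]

-- The flat range splits into per-row blocks.
theorem flat_blocks (H W : Int) (hW : 0 < W) : ∀ n : Nat,
    (List.range n).flatMap (fun (q : Nat) => rowA W (H - 1 - (q : Int))) =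
      (List.range (n * W.toNat)).map (fun (k : Nat) => cellB H W ((k : Int))) := by
  intro n
  induction n with
  | zero => simp
  | succ n ih =>
    rw [List.range_succ, List.flatMap_append, ih, Nat.succ_mul, List.range_add,
        List.map_append, List.map_map]
    congr 1
    simp only [List.flatMap_cons, List.flatMap_nil, List.append_nil]
    rw [row_eq_block H W hW n]
    apply List.map_congr_left
    intro r _
    simp only [Function.comp]
    congr 1
    have hWc : ((W.toNat : Int)) = W := Int.toNat_of_nonneg hW.le
    push_cast [hWc]
    ring

-- ===== VERDICT (by name: the statement is the Claim_ definition above) =====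
theorem graph_backward_spec : Claim_equal_graph_backward := by
  intro H W _
  unfold Spec_graph_backward graph_backward graph_backward_alt
  by_cases hW : W ≤ 0
  · rw [if_pos hW]
    apply List.flatMap_eq_nil_iff.mpr
    intro i _
    by_cases hodd : PySem.Int.mod i 2 ≠ 0 <;>
      simp [PySem.List.pyRange_one_eq_nil hW,
        PySem.List.pyRange_neg_one_eq_nil (by omega : W - 1 ≤ -1)]
  · rw [if_neg hW]
    have hW' : 0 < W := by omega
    have hA : (PySem.List.pyRange (H - 1) (-1) (-1)).flatMap (fun i => rowA W i) =
        (List.range (H - 1 - (-1)).toNat).flatMap (fun (q : Nat) => rowA W (H - 1 - (q : Int))) := by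
      rw [PySem.List.pyRange_neg_one, List.flatMap_map]
    have hB : PySem.List.pyRange 0 (H * W) 1 =
        (List.range ((H - 1 - (-1)).toNat * W.toNat)).map (fun (k : Nat) => (k : Int)) := by
      rw [PySem.List.pyRange_one]
      have : (H * W - 0).toNat = (H - 1 - (-1)).toNat * W.toNat := by
        by_cases h : H ≤ 0
        · have hle : H * W ≤ 0 := mul_nonpos_of_nonpos_of_nonneg h (le_of_lt hW')
          rw [Int.sub_zero, Int.toNat_of_nonpos hle,
            Int.toNat_of_nonpos (by omega : H - 1 - (-1) ≤ 0)]
          simp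
        · have e : H * W = ((H - 1 - (-1)).toNat : Int) * ((W.toNat : Int)) := by
            rw [Int.toNat_of_nonneg (by omega : (0:Int) ≤ H - 1 - (-1)),
              Int.toNat_of_nonneg (le_of_lt hW')]
            have e0 : H - 1 - (-1) = H := by ring
            rw [e0]
          rw [Int.sub_zero, e, ← Nat.cast_mul, Int.toNat_natCast]
      rw [this]
      simp
    calc (PySem.List.pyRange (H - 1) (-1) (-1)).flatMap (fun i =>
          if PySem.Int.mod i 2 ≠ 0 then
            (PySem.List.pyRange 0 W 1).map (fun j =>
              if j ≠ 0 then (i, j, some (j - 1)) else (i, j, none))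
          else
            (PySem.List.pyRange (W - 1) (-1) (-1)).map (fun j =>
              if j = W - 1 then (i, j, none) else (i, j, some (j + 1))))
        = (PySem.List.pyRange (H - 1) (-1) (-1)).flatMap (fun i => rowA W i) := rfl
      _ = (List.range ((H - 1 - (-1)).toNat * W.toNat)).map (fun (k : Nat) => cellB H W ((k : Int))) := by
            rw [hA, flat_blocks H W hW']
      _ = (PySem.List.pyRange 0 (H * W) 1).map (fun k => cellB H W k) := by
            rw [hB, List.map_map]; rfl
      _ = _ := rfl
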